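-- pv_equiv track=rewrite | github.com/1223v/Algorithm | programmers/99club/60060_trie.py | solution
-- ===== SOURCE A (Python) =====
-- class Trie:
--     def __init__(self):
--         self.child = dict()
--         self.count = 0
--
--     def insert(self,word):
--         curr = self
--         for i in word:
--             curr.count += 1
--             if not i in curr.child:
--                 curr.child[i] = Trie()
--             curr = curr.child[i]
--         curr.count += 1
--
--     def search(self, word):
--         curr = self
--         for i in word:
--             if i =="?":
--                 return curr.count
--             if i not in curr.child:
--                 return 0
--             curr = curr.child[i]
--
--
--         return curr.count
--
-- def solution(words, queries):
--     TrieRoot = [Trie() for _ in range(10000)]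
--     ReTrieRoot = [Trie() for _ in range(10000)]
--
--     answer = []
--
--     for i in words:
--         TrieRoot[len(i)-1].insert(i)
--         ReTrieRoot[len(i)-1].insert(i[::-1])
--
--     for i in queries:
--         if i[0] != "?":
--             res = TrieRoot[len(i)-1].search(i)
--
--         else:
--             res = ReTrieRoot[len(i)-1].search(i[::-1])
--
--         answer.append(res)
--
--     return answer
-- ===== SOURCE B (Python) =====
-- def solution(words, queries):
--     # Instead of tries: one flat dict per direction counting, for every word,
--     # each of its (length, prefix) pairs; a query is answered by a single
--     # lookup of (its length, its fixed part).
--     counts = _prefix_counts(words)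
--     rcounts = _prefix_counts([w[::-1] for w in words])
--     answer = []
--     for q in queries:
--         if q[0] != '?':
--             answer.append(counts.get((len(q), _fixed_part(q)), 0))
--         else:
--             answer.append(rcounts.get((len(q), _fixed_part(q[::-1])), 0))
--     return answer
--
--
-- def _prefix_counts(strs):
--     counts = {}
--     for s in strs:
--         L = len(s)
--         for k in range(L + 1):
--             key = (L, s[:k])
--             counts[key] = counts.get(key, 0) + 1
--     return counts
--
--
-- def _fixed_part(s):
--     out = []
--     for ch in s:
--         if ch == '?':
--             break
--         out.append(ch)
--     return ''.join(out)
-- ===== Notes on version B (the rewrite author's own statement) =====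
-- stated objective: alternative
-- what changed: Replaces the two fixed arrays of 10000 character-tries (insert/search with per-node counters) by one flat (length, prefix)->count dictionary per direction, built in one pass over the words; each query becomes a single lookup of (its length, its fixed part).
import Mathlib
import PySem

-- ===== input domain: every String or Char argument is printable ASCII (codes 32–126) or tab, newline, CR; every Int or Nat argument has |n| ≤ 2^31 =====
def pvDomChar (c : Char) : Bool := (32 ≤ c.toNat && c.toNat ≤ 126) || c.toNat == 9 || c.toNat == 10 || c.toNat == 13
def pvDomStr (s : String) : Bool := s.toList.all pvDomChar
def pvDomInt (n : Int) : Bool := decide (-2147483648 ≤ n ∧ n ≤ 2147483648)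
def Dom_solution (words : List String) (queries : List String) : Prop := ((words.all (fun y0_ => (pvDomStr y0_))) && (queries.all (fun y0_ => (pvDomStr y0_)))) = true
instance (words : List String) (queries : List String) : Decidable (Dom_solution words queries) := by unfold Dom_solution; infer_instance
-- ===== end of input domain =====

-- B replaces A's fixed arrays of 10000 character-tries by one flat (length, prefix) → count
-- dictionary per direction; a query is a single lookup of its length and fixed part (objective: alternative).

-- ===== PORT A =====
-- Python's Trie has 'child : dict' holding Tries; a nested inductive is not allowed,
-- so the child dict is the mutual assoc-list type PChildren (insertion order, first match = dict).
mutual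
inductive PTrie where
  | mk : Nat → PChildren → PTrie
  deriving DecidableEq, Repr
inductive PChildren where
  | nil : PChildren
  | cons : Char → PTrie → PChildren → PChildren
  deriving DecidableEq, Repr
end

def emptyT : PTrie := .mk 0 .nil

-- dict lookup: first (unique) match
def lookupC : PChildren → Char → Option PTrie
  | .nil, _ => none
  | .cons d t rest, c => if d = c then some t else lookupC rest c

-- dict store: overwrite in place, new keys append (Python dict semantics)
def setC : PChildren → Char → PTrie → PChildren
  | .nil, c, t => .cons c t .nil
  | .cons d u rest, c, t => if d = c then .cons d t rest else .cons d u (setC rest c t)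

-- Trie.insert: the Python loop (curr.count += 1; create child if absent; descend; final count += 1),
-- as structural recursion on the word
def insertT : PTrie → List Char → PTrie
  | .mk n ch, [] => .mk (n + 1) ch
  | .mk n ch, c :: rest =>
      let child := match lookupC ch c with
        | some t => t
        | none => emptyT
      .mk (n + 1) (setC ch c (insertT child rest))

-- Trie.search
def searchT : PTrie → List Char → Nat
  | .mk n _, [] => n
  | .mk n ch, c :: rest =>
      if c = '?' then n
      else match lookupC ch c with
        | none => 0
        | some t => searchT t rest

-- TrieRoot[len(i)-1].insert(i): hand port of indexed assignment on the fixed list;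
-- exact where the (possibly negative) index is in range (pyGet? none = IndexError, excluded by Pre_)
def pyInsertAt (ts : List PTrie) (i : Int) (w : List Char) : List PTrie :=
  match PySem.List.pyGet? ts i with
  | none => ts
  | some t => ts.set (if i < 0 then (i + ts.length).toNat else i.toNat) (insertT t w)

-- the body of A's query loop: search the matching trie (res)
def queryA (roots re : List PTrie) (q : String) : Nat :=
  let cs := q.toList
  match cs with
  | [] => 0   -- q[0]: IndexError in Python, excluded by Pre_
  | c :: _ =>
    if c ≠ '?' then
      match PySem.List.pyGet? roots ((cs.length : Int) - 1) with
      | none => 0   -- IndexError, excluded by Pre_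
      | some t => searchT t cs
    else
      match PySem.List.pyGet? re ((cs.length : Int) - 1) with
      | none => 0   -- IndexError, excluded by Pre_
      | some t => searchT t cs.reverse

def solution (words : List String) (queries : List String) : List Int :=
  let roots0 : List PTrie := List.replicate 10000 emptyT
  let re0 : List PTrie := List.replicate 10000 emptyT
  let st := words.foldl
    (fun (p : List PTrie × List PTrie) w =>
      (pyInsertAt p.1 ((w.toList.length : Int) - 1) w.toList,
       pyInsertAt p.2 ((w.toList.length : Int) - 1) w.toList.reverse))
    (roots0, re0)
  queries.foldl (fun (answer : List Int) q => answer ++ [(queryA st.1 st.2 q : Int)]) []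

-- ===== PORT B =====
-- helper _fixed_part: the chars before the first '?'
def fixedPart : List Char → List Char
  | [] => []
  | c :: rest => if c = '?' then [] else c :: fixedPart rest

-- helper _prefix_counts: count every (length, prefix) pair of every string
def prefixCounts (strs : List String) : PySem.Dict (Nat × List Char) Int :=
  strs.foldl
    (fun counts s =>
      (PySem.List.pyRange 0 ((s.toList.length : Int) + 1)).foldl
        (fun counts k =>
          counts.modify (s.toList.length, PySem.List.slice s.toList none (some k)) 0 (· + 1))
        counts)
    PySem.Dict.empty

def solution_alt (words : List String) (queries : List String) : List Int :=
  let counts := prefixCounts words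
  let rcounts := prefixCounts (words.map (fun w => String.ofList w.toList.reverse))   -- w[::-1]
  queries.map (fun q =>
    match q.toList with
    | [] => 0   -- q[0]: IndexError in Python, excluded by Pre_
    | c :: _ =>
      if c ≠ '?' then counts.getD (q.toList.length, fixedPart q.toList) 0
      else rcounts.getD (q.toList.length, fixedPart q.toList.reverse) 0)

-- ===== PRECONDITION & SPEC =====
-- Pre_ excludes: empty queries and words/queries longer than 10000 (A raises IndexError on its
-- fixed 10000-slot arrays), and queries of length exactly 10000, on which A returns a value read
-- from bucket 9999 that accidentally conflates empty words with length-10000 words.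
def Pre_solution (words : List String) (queries : List String) : Prop :=
  (∀ w ∈ words, w.toList.length ≤ 10000) ∧
  (∀ q ∈ queries, 1 ≤ q.toList.length ∧ q.toList.length ≤ 9999)
instance (words : List String) (queries : List String) : Decidable (Pre_solution words queries) := by
  unfold Pre_solution; infer_instance

def pvWitness_solution : List String × List String :=
  (["frodo", "front", "frost", "kakao", ""], ["fro??", "????o", "pro?", "?odo"])

def Spec_solution (words : List String) (queries : List String) (out : List Int) : Prop := out = solution_alt words queries
instance (words : List String) (queries : List String) (out : List Int) : Decidable (Spec_solution words queries out) := by unfold Spec_solution; infer_instance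

-- ===== CLAIM (what is proved, stated in full; the proofs are below) =====
def Claim_equal_solution : Prop := ∀ (words : List String) (queries : List String), Dom_solution words queries → Pre_solution words queries → Spec_solution words queries (solution words queries)

-- ===== LEMMAS AND PROOFS =====

def PTrie.count : PTrie → Nat
  | .mk n _ => n

def PTrie.children : PTrie → PChildren
  | .mk _ ch => ch


-- count of a trie after inserting one word
theorem count_insertT (t : PTrie) (w : List Char) : (insertT t w).count = t.count + 1 := by
  cases t with | mk n ch => cases w <;> simp [insertT, PTrie.count]

-- count of a trie after inserting a list of words
theorem count_foldl_insertT (ws : List (List Char)) (t : PTrie) :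
    (ws.foldl insertT t).count = t.count + ws.length := by
  induction ws generalizing t with
  | nil => simp
  | cons w ws ih => simp [List.foldl_cons, ih, count_insertT]; omega

theorem lookupC_setC_self : ∀ (ch : PChildren) (c : Char) (t : PTrie),
    lookupC (setC ch c t) c = some t
  | .nil, c, t => by simp [setC, lookupC]
  | .cons d u rest, c, t => by
      by_cases h : d = c <;>
        simp [setC, h, lookupC, lookupC_setC_self rest c t]

theorem lookupC_setC_ne : ∀ (ch : PChildren) {c c' : Char}, c' ≠ c → ∀ (t : PTrie),
    lookupC (setC ch c t) c' = lookupC ch c'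
  | .nil, c, c', h, t => by
      simp only [setC, lookupC, if_neg (fun hh : c = c' => h hh.symm)]
  | .cons d u rest, c, c', h, t => by
      by_cases hd : d = c
      · subst hd
        rw [show setC (.cons d u rest) d t = .cons d t rest from by simp [setC]]
        simp only [lookupC, if_neg (fun hh : d = c' => h hh.symm)]
      · simp only [setC, if_neg hd]
        by_cases hd' : d = c' <;> simp [lookupC, hd', lookupC_setC_ne rest h t]

-- the tails of the words of ws that start with c
def childWords (c : Char) (ws : List (List Char)) : List (List Char) :=
  ws.filterMap (fun w => match w with
    | [] => none
    | d :: tl => if d = c then some tl else none)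

theorem lookup_foldl_insertT (ws : List (List Char)) (t : PTrie) (c : Char) :
    lookupC (ws.foldl insertT t).children c =
      match lookupC t.children c with
      | some u => some ((childWords c ws).foldl insertT u)
      | none =>
          if childWords c ws = [] then none
          else some ((childWords c ws).foldl insertT emptyT) := by
  induction ws generalizing t with
  | nil => cases h : lookupC t.children c <;> simp [childWords, h]
  | cons w ws ih =>
      simp only [List.foldl_cons]
      rw [ih]
      cases w with
      | nil =>
        have h1 : (insertT t []).children = t.children := by cases t; rfl
        have h2 : childWords c ([] :: ws) = childWords c ws := by
          simp [childWords]
        rw [h1, h2]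
      | cons d tl =>
        by_cases hd : d = c
        · subst hd
          have h1 : (insertT t (d :: tl)).children
              = setC t.children d
                  (insertT (match lookupC t.children d with
                            | some u => u
                            | none => emptyT) tl) := by
            cases t; rfl
          have h2 : childWords d ((d :: tl) :: ws) = tl :: childWords d ws := by
            simp [childWords]
          rw [h1, h2, lookupC_setC_self]
          cases hu : lookupC t.children d with
          | some u => simp [List.foldl_cons]
          | none => simp [List.foldl_cons]
        · have h1 : lookupC (insertT t (d :: tl)).children c = lookupC t.children c := by
            cases t with
            | mk n ch =>
              simp only [insertT, PTrie.children]
              exact lookupC_setC_ne _ (fun hh : c = d => hd hh.symm) _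
          have h2 : childWords c ((d :: tl) :: ws) = childWords c ws := by
            simp [childWords, hd]
          rw [h1, h2]

theorem searchT_nil (t : PTrie) : searchT t [] = t.count := by cases t; rfl

theorem searchT_cons (t : PTrie) (c : Char) (rest : List Char) :
    searchT t (c :: rest)
      = if c = '?' then t.count
        else match lookupC t.children c with
             | none => 0
             | some u => searchT u rest := by
  cases t; rfl

-- stepping a pattern char into the trie = stepping it in the word list
theorem countP_childWords (c : Char) (q : List Char) (ws : List (List Char)) :
    ws.countP (fun w => (c :: q).isPrefixOf w)
      = (childWords c ws).countP (fun w => q.isPrefixOf w) := by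
  induction ws with
  | nil => rfl
  | cons w ws ih =>
    cases w with
    | nil => simp [childWords, List.filterMap_cons, List.countP_cons, List.isPrefixOf, ih]
    | cons d tl =>
      by_cases hd : d = c
      · subst hd
        simpa [childWords, List.filterMap_cons, List.countP_cons, List.isPrefixOf, ih]
          using congrArg _ (ih.symm)
      · simp [childWords, List.filterMap_cons, List.countP_cons, List.isPrefixOf, hd,
              Ne.symm hd, ih]

-- the central characterisation: searching the trie built from ws counts the words
-- with the pattern's fixed part as a prefix
theorem search_foldl_insertT (p : List Char) (ws : List (List Char)) :
    searchT (ws.foldl insertT emptyT) p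
      = ws.countP (fun w => (fixedPart p).isPrefixOf w) := by
  induction p generalizing ws with
  | nil =>
    rw [searchT_nil, count_foldl_insertT]
    simp [fixedPart, emptyT, PTrie.count]
  | cons c rest ih =>
    by_cases hc : c = '?'
    · subst hc
      rw [searchT_cons, if_pos rfl, count_foldl_insertT]
      simp [fixedPart, emptyT, PTrie.count]
    · rw [searchT_cons, if_neg hc, lookup_foldl_insertT]
      have hfix : fixedPart (c :: rest) = c :: fixedPart rest := by simp [fixedPart, hc]
      have hemp : lookupC emptyT.children c = none := rfl
      rw [hemp, hfix, countP_childWords]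
      by_cases hnil : childWords c ws = []
      · simp [hnil]
      · simp only [if_neg hnil]
        exact ih (childWords c ws)

-- A's wrapped bucket index for a word of length ≤ 10000
def bucketIdx (L : Nat) : Nat := if L = 0 then 9999 else L - 1

-- bucket j of A's array after the insertion loop = the trie of the words whose
-- wrapped index is j
theorem bucketIdx_lt {L : Nat} (hL : L ≤ 10000) : bucketIdx L < 10000 := by
  unfold bucketIdx; split <;> omega

theorem pyInsertAt_spec (ts : List PTrie) (hlen : ts.length = 10000) {L : Nat}
    (hL : L ≤ 10000) (w : List Char) (hj : bucketIdx L < ts.length) :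
    pyInsertAt ts ((L : Int) - 1) w
      = ts.set (bucketIdx L) (insertT (ts[bucketIdx L]'hj) w) := by
  unfold pyInsertAt
  by_cases h0 : L = 0
  · subst h0
    have h1 : ((0 : Nat) : Int) - 1 = -1 := by norm_num
    have h2 : ts.getLast? = some (ts[bucketIdx 0]'hj) := by
      rw [List.getLast?_eq_getElem?, List.getElem?_eq_getElem (by omega)]
      congr 1
      · simp [bucketIdx, hlen]
    rw [h1, PySem.List.pyGet?_neg_one, h2]
    have h3 : ((-1 : Int) + ts.length).toNat = bucketIdx 0 := by
      simp [bucketIdx, hlen]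
    simp [h3]
  · have h1 : ((L : Nat) : Int) - 1 = ((L - 1 : Nat) : Int) := by omega
    have hj' : L - 1 < ts.length := by omega
    rw [h1, PySem.List.pyGet?_natCast, List.getElem?_eq_getElem hj']
    have h2 : ¬ (((L - 1 : Nat) : Int) < 0) := by omega
    have h3 : ((L - 1 : Nat) : Int).toNat = bucketIdx L := by
      simp [bucketIdx, h0]
    simp only [if_neg h2, h3]
    congr 2
    simp [bucketIdx, h0]

theorem getElem?_foldl_insert (ws : List String) (f : String → List Char)
    (hws : ∀ w ∈ ws, w.toList.length ≤ 10000) :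
    ∀ (ts : List PTrie), ts.length = 10000 → ∀ (j : Nat) (hj : j < ts.length),
    (ws.foldl (fun ts w => pyInsertAt ts ((w.toList.length : Int) - 1) (f w)) ts)[j]?
      = some (((ws.filter (fun w => bucketIdx w.toList.length == j)).map f).foldl insertT
              (ts[j]'hj)) := by
  induction ws with
  | nil =>
    intro ts hlen j hj
    simp [List.getElem?_eq_getElem hj]
  | cons w ws ih =>
    intro ts hlen j hj
    have hw : w.toList.length ≤ 10000 := hws w (by simp)
    have hbj : bucketIdx w.toList.length < ts.length := by
      rw [hlen]; exact bucketIdx_lt hw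
    rw [List.foldl_cons, pyInsertAt_spec ts hlen hw _ hbj,
        ih (fun v hv => hws v (by simp [hv])) _ (by simp [hlen]) j (by simp [hj])]
    by_cases hkj : bucketIdx w.toList.length = j
    · subst hkj
      have hp : (bucketIdx w.toList.length == bucketIdx w.toList.length) = true :=
        beq_self_eq_true _
      rw [List.filter_cons, if_pos hp, List.map_cons, List.foldl_cons]
      congr 2
      rw [List.getElem_set, if_pos rfl]
    · have hp : ¬ ((bucketIdx w.toList.length == j) = true) := by
        simp only [beq_iff_eq]; exact hkj
      rw [List.filter_cons, if_neg hp]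
      congr 2
      rw [List.getElem_set, if_neg hkj]

-- the (length, prefix) keys one string contributes
def keyList (cs : List Char) : List (Nat × List Char) :=
  (List.range (cs.length + 1)).map (fun k => (cs.length, cs.take k))

theorem keyList_nodup (cs : List Char) : (keyList cs).Nodup := by
  unfold keyList
  apply List.Nodup.map_on _ List.nodup_range
  intro x hx y hy hxy
  have hx' : x < cs.length + 1 := List.mem_range.mp hx
  have hy' : y < cs.length + 1 := List.mem_range.mp hy
  have htk : cs.take x = cs.take y := congrArg Prod.snd hxy
  have hlx : (cs.take x).length = x := by simp; omega
  have hly : (cs.take y).length = y := by simp; omega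
  rw [← hlx, ← hly, htk]

theorem keyList_count (cs : List Char) (n : Nat) (p : List Char) :
    (keyList cs).count (n, p)
      = if n = cs.length ∧ p.isPrefixOf cs then 1 else 0 := by
  by_cases h : n = cs.length ∧ p.isPrefixOf cs
  · rw [if_pos h]
    obtain ⟨hn, hp⟩ := h
    have hpre : p <+: cs := List.isPrefixOf_iff_prefix.mp hp
    have hple : p.length ≤ cs.length := hpre.length_le
    apply List.count_eq_one_of_mem (keyList_nodup cs)
    unfold keyList
    apply List.mem_map.mpr
    refine ⟨p.length, List.mem_range.mpr (by omega), ?_⟩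
    rw [← List.prefix_iff_eq_take.mp hpre, hn]
  · rw [if_neg h]
    apply List.count_eq_zero_of_not_mem
    intro hmem
    unfold keyList at hmem
    obtain ⟨k, hk, hkey⟩ := List.mem_map.mp hmem
    obtain ⟨h1, h2⟩ := Prod.mk.injEq .. ▸ hkey
    exact h ⟨h1.symm, List.isPrefixOf_iff_prefix.mpr (h2 ▸ List.take_prefix k cs)⟩

-- the inner k-loop of _prefix_counts is exactly a counting loop over keyList
theorem inner_eq (s : String) (d : PySem.Dict (Nat × List Char) Int) :
    (PySem.List.pyRange 0 ((s.toList.length : Int) + 1)).foldl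
        (fun counts k =>
          counts.modify (s.toList.length, PySem.List.slice s.toList none (some k)) 0 (· + 1))
        d
      = (keyList s.toList).foldl (fun d x => d.modify x 0 (· + 1)) d := by
  have h1 : ((s.toList.length : Int) + 1) = ((s.toList.length + 1 : Nat) : Int) := by
    push_cast; ring
  rw [h1, PySem.List.pyRange_zero_natCast, List.foldl_map]
  unfold keyList
  rw [List.foldl_map]
  apply PySem.List.foldl_congr_mem
  intro acc k _
  rw [PySem.List.slice_to s.toList (Int.natCast_nonneg k), Int.toNat_natCast]

theorem getD_foldl_inner (strs : List String) (v : Nat × List Char) :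
    ∀ d : PySem.Dict (Nat × List Char) Int,
    (strs.foldl
        (fun counts s =>
          (PySem.List.pyRange 0 ((s.toList.length : Int) + 1)).foldl
            (fun counts k =>
              counts.modify (s.toList.length, PySem.List.slice s.toList none (some k)) 0 (· + 1))
            counts) d).getD v 0
      = d.getD v 0 + (strs.map (fun s => ((keyList s.toList).count v : Int))).sum := by
  induction strs with
  | nil => intro d; simp
  | cons s strs ih =>
      intro d
      rw [List.foldl_cons, ih, inner_eq, PySem.Dict.getD_foldl_modify_add_one,
          List.map_cons, List.sum_cons]
      ring

theorem getD_prefixCounts (strs : List String) (n : Nat) (p : List Char) :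
    (prefixCounts strs).getD (n, p) 0
      = (strs.countP (fun s => decide (n = s.toList.length) && p.isPrefixOf s.toList) : Int) := by
  unfold prefixCounts
  rw [getD_foldl_inner, PySem.Dict.getD_empty]
  have hmap : strs.map (fun s => ((keyList s.toList).count (n, p) : Int))
      = strs.map (fun s =>
          if (decide (n = s.toList.length) && p.isPrefixOf s.toList) = true then (1 : Int) else 0) := by
    apply List.map_congr_left
    intro s _
    rw [keyList_count]
    by_cases hh : n = s.toList.length ∧ p.isPrefixOf s.toList
    · rw [if_pos hh, if_pos (by rw [Bool.and_eq_true, decide_eq_true_eq]; exact hh)]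
      rfl
    · rw [if_neg hh, if_neg (by rw [Bool.and_eq_true, decide_eq_true_eq]; exact hh)]
      rfl
  rw [hmap, PySem.List.sum_map_ite_one_zero]
  ring

-- A's wrapped bucket test agrees with B's length test for query lengths 1..9999
theorem bucket_filter_eq (words : List String) (hw : ∀ w ∈ words, w.toList.length ≤ 10000)
    {n : Nat} (h1 : 1 ≤ n) (h2 : n ≤ 9999) :
    words.filter (fun w => bucketIdx w.toList.length == n - 1)
      = words.filter (fun w => w.toList.length == n) := by
  apply List.filter_congr
  intro w hw'
  have hle := hw w hw'
  unfold bucketIdx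
  by_cases h : w.toList.length = n
  · rw [h, if_neg (by omega), beq_self_eq_true, beq_self_eq_true]
  · by_cases h0 : w.toList.length = 0
    · have l1 : ((9999 : Nat) == n - 1) = false := by rw [beq_eq_false_iff_ne]; omega
      have l2 : ((0 : Nat) == n) = false := by rw [beq_eq_false_iff_ne]; omega
      rw [h0, if_pos rfl, l1, l2]
    · have l1 : (w.toList.length - 1 == n - 1) = false := by rw [beq_eq_false_iff_ne]; omega
      have l2 : (w.toList.length == n) = false := by rw [beq_eq_false_iff_ne]; exact h
      rw [if_neg h0, l1, l2]

-- ===== VERDICT (by name: the statement is the Claim_ definition above) =====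
theorem solution_spec : Claim_equal_solution := by
  intro words queries _ hpre
  obtain ⟨hw, hq⟩ := hpre
  unfold Spec_solution solution solution_alt
  simp only [PySem.List.foldl_append_singleton_eq_map, List.nil_append]
  have hA := PySem.List.foldl_prod_mk
    (fun (ts : List PTrie) (w : String) => pyInsertAt ts ((w.toList.length : Int) - 1) w.toList)
    (fun (ts : List PTrie) (w : String) =>
      pyInsertAt ts ((w.toList.length : Int) - 1) w.toList.reverse)
    words (List.replicate 10000 emptyT) (List.replicate 10000 emptyT)
  rw [hA]
  apply List.map_congr_left
  intro q hmem
  obtain ⟨hq1, hq2⟩ := hq q hmem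
  unfold queryA
  cases hcs : q.toList with
  | nil => rw [hcs] at hq1; simp at hq1
  | cons c cs' =>
    rw [hcs] at hq1 hq2
    simp only []
    have h1 : 1 ≤ (c :: cs').length := hq1
    have h2 : (c :: cs').length ≤ 9999 := hq2
    have he : (((c :: cs').length : Nat) : Int) - 1 = (((c :: cs').length - 1 : Nat) : Int) := by
      omega
    have hws10000 : ∀ w ∈ words, w.toList.length ≤ 10000 := hw
    have hrep : (List.replicate 10000 emptyT : List PTrie).length = 10000 :=
      List.length_replicate
    have hjlt : (c :: cs').length - 1 < (List.replicate 10000 emptyT : List PTrie).length := by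
      rw [hrep]; omega
    by_cases hc : c = '?'
    · subst hc
      rw [if_neg (fun hne => hne rfl), if_neg (fun hne => hne rfl)]
      rw [he, PySem.List.pyGet?_natCast,
          getElem?_foldl_insert words (fun w => w.toList.reverse) hws10000
            (List.replicate 10000 emptyT) hrep (('?' :: cs').length - 1) hjlt]
      simp only [List.getElem_replicate]
      rw [search_foldl_insertT, getD_prefixCounts,
          bucket_filter_eq words hws10000 h1 h2, List.countP_map, List.countP_map,
          List.countP_filter]
      congr 1
      apply List.countP_congr
      intro w _
      simp only [Function.comp_apply, String.toList_ofList, List.length_reverse,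
        Bool.and_eq_true, beq_iff_eq, decide_eq_true_eq]
      constructor
      · rintro ⟨hp, hl⟩; exact ⟨hl.symm, hp⟩
      · rintro ⟨hl, hp⟩; exact ⟨hp, hl.symm⟩
    · rw [if_pos (fun heq => hc heq), if_pos (fun heq => hc heq)]
      rw [he, PySem.List.pyGet?_natCast,
          getElem?_foldl_insert words (fun w => w.toList) hws10000
            (List.replicate 10000 emptyT) hrep ((c :: cs').length - 1) hjlt]
      simp only [List.getElem_replicate]
      rw [search_foldl_insertT, getD_prefixCounts,
          bucket_filter_eq words hws10000 h1 h2, List.countP_map, List.countP_filter]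
      congr 1
      apply List.countP_congr
      intro w _
      simp only [Function.comp_apply, List.length_reverse,
        Bool.and_eq_true, beq_iff_eq, decide_eq_true_eq]
      constructor
      · rintro ⟨hp, hl⟩; exact ⟨hl.symm, hp⟩
      · rintro ⟨hl, hp⟩; exact ⟨hp, hl.symm⟩
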